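-- pv_equiv track=rewrite | github.com/2420090149-klh/CN-HACKATHON | src/phish_detector/batch.py | summarize_batch
-- ===== SOURCE A (Python) =====
-- from collections.abc import Iterable
--
-- def summarize_batch(results: Iterable[dict[str, object]]) -> dict[str, int]:
--     summary = {"total": 0, "likely_phishing": 0, "suspicious": 0, "probably_safe": 0}
--     for result in results:
--         summary["total"] += 1
--         verdict = str(result.get("verdict", ""))
--         if verdict == "Likely phishing":
--             summary["likely_phishing"] += 1
--         elif verdict == "Suspicious":
--             summary["suspicious"] += 1
--         else:
--             summary["probably_safe"] += 1
--     return summary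
-- ===== SOURCE B (Python) =====
-- def summarize_batch(results):
--     verdicts = [str(r.get("verdict", "")) for r in results]
--     total = len(verdicts)
--     likely = verdicts.count("Likely phishing")
--     suspicious = verdicts.count("Suspicious")
--     return {
--         "total": total,
--         "likely_phishing": likely,
--         "suspicious": suspicious,
--         "probably_safe": total - likely - suspicious,
--     }
-- ===== Notes on version B (the rewrite author's own statement) =====
-- stated objective: simpler
-- what changed: B extracts all verdict strings in one comprehension, obtains the two named categories by list.count and derives probably_safe by subtraction (total - likely - suspicious), replacing A's per-element three-way branch that increments a mutable summary dict.
import Mathlib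
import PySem

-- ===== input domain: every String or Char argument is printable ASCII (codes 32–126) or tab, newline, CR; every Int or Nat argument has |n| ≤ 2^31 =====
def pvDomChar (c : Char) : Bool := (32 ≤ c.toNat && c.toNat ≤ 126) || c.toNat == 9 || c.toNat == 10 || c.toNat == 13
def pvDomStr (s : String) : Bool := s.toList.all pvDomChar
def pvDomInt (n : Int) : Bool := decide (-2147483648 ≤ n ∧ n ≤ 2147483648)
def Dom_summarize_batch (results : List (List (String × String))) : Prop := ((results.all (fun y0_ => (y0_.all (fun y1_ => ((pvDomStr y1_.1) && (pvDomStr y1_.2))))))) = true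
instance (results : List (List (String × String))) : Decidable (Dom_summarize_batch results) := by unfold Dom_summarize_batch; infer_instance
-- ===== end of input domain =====

-- B computes the summary by counting verdict strings with list.count and deriving
-- probably_safe by subtraction, instead of A's per-element three-way branch on a mutable dict (objective: simpler).


-- ===== PORT A =====
-- the loop body of A: bump "total", then one of the three category counters
def pvStepA (summary : PySem.Dict String Int) (result : List (String × String)) : PySem.Dict String Int :=
  let summary := summary.modify "total" 0 (· + 1)
  let verdict := (PySem.Dict.mk result).getD "verdict" ""
  if verdict == "Likely phishing" then summary.modify "likely_phishing" 0 (· + 1)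
  else if verdict == "Suspicious" then summary.modify "suspicious" 0 (· + 1)
  else summary.modify "probably_safe" 0 (· + 1)

def summarize_batch (results : List (List (String × String))) : List (String × Int) :=
  (results.foldl pvStepA
    (PySem.Dict.mk [("total", 0), ("likely_phishing", 0), ("suspicious", 0), ("probably_safe", 0)])).items

-- ===== PORT B =====
def summarize_batch_alt (results : List (List (String × String))) : List (String × Int) :=
  let verdicts := results.map (fun r => (PySem.Dict.mk r).getD "verdict" "")
  let total : Int := verdicts.length
  let likely : Int := PySem.List.count verdicts "Likely phishing"
  let suspicious : Int := PySem.List.count verdicts "Suspicious"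
  [("total", total), ("likely_phishing", likely), ("suspicious", suspicious),
   ("probably_safe", total - likely - suspicious)]

-- ===== PRECONDITION & SPEC =====
def Spec_summarize_batch (results : List (List (String × String))) (out : List (String × Int)) : Prop := out = summarize_batch_alt results
instance (results : List (List (String × String))) (out : List (String × Int)) : Decidable (Spec_summarize_batch results out) := by unfold Spec_summarize_batch; infer_instance

-- ===== CLAIM (what is proved, stated in full; the proofs are below) =====
def Claim_equal_summarize_batch : Prop := ∀ (results : List (List (String × String))), Dom_summarize_batch results → Spec_summarize_batch results (summarize_batch results)

-- ===== LEMMAS AND PROOFS =====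
def pvVd (r : List (String × String)) : String := (PySem.Dict.mk r).getD "verdict" ""

lemma pvStepA_eq (d : PySem.Dict String Int) (r : List (String × String)) :
    pvStepA d r =
      if pvVd r == "Likely phishing" then (d.modify "total" 0 (· + 1)).modify "likely_phishing" 0 (· + 1)
      else if pvVd r == "Suspicious" then (d.modify "total" 0 (· + 1)).modify "suspicious" 0 (· + 1)
      else (d.modify "total" 0 (· + 1)).modify "probably_safe" 0 (· + 1) := rfl

lemma pvLoopA (rs : List (List (String × String))) (t l s p : Int) :
    rs.foldl pvStepA (PySem.Dict.mk [("total", t), ("likely_phishing", l), ("suspicious", s), ("probably_safe", p)]) =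
      PySem.Dict.mk [("total", t + rs.length),
        ("likely_phishing", l + ((rs.map pvVd).count "Likely phishing" : Int)),
        ("suspicious", s + ((rs.map pvVd).count "Suspicious" : Int)),
        ("probably_safe", p + ((rs.length : Int) - ((rs.map pvVd).count "Likely phishing" : Int) - ((rs.map pvVd).count "Suspicious" : Int)))] := by
  induction rs generalizing t l s p with
  | nil => simp
  | cons r rs ih =>
    rw [List.foldl_cons, pvStepA_eq]
    have hLP : ( (PySem.Dict.mk [("total", t), ("likely_phishing", l), ("suspicious", s), ("probably_safe", p)]).modify "total" 0 (· + 1) |>.modify "likely_phishing" 0 (· + 1) )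
        = PySem.Dict.mk [("total", t + 1), ("likely_phishing", l + 1), ("suspicious", s), ("probably_safe", p)] := by
      simp [PySem.Dict.modify, PySem.Dict.insert, PySem.Dict.getD, PySem.Dict.get?, PySem.Dict.contains]
    have hS : ( (PySem.Dict.mk [("total", t), ("likely_phishing", l), ("suspicious", s), ("probably_safe", p)]).modify "total" 0 (· + 1) |>.modify "suspicious" 0 (· + 1) )
        = PySem.Dict.mk [("total", t + 1), ("likely_phishing", l), ("suspicious", s + 1), ("probably_safe", p)] := by
      simp [PySem.Dict.modify, PySem.Dict.insert, PySem.Dict.getD, PySem.Dict.get?, PySem.Dict.contains]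
    have hPS : ( (PySem.Dict.mk [("total", t), ("likely_phishing", l), ("suspicious", s), ("probably_safe", p)]).modify "total" 0 (· + 1) |>.modify "probably_safe" 0 (· + 1) )
        = PySem.Dict.mk [("total", t + 1), ("likely_phishing", l), ("suspicious", s), ("probably_safe", p + 1)] := by
      simp [PySem.Dict.modify, PySem.Dict.insert, PySem.Dict.getD, PySem.Dict.get?, PySem.Dict.contains]
    by_cases h1 : pvVd r = "Likely phishing"
    · have e1 : (pvVd r == "Likely phishing") = true := by simp [h1]
      rw [e1, if_pos rfl, hLP, ih]
      simp [h1]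
      omega
    · have e1 : (pvVd r == "Likely phishing") = false := by simp [h1]
      rw [e1]
      by_cases h2 : pvVd r = "Suspicious"
      · have e2 : (pvVd r == "Suspicious") = true := by simp [h2]
        rw [if_neg (by simp), e2, if_pos rfl, hS, ih]
        simp [h2]
        omega
      · have e2 : (pvVd r == "Suspicious") = false := by simp [h2]
        rw [if_neg (by simp), e2, if_neg (by simp), hPS, ih]
        simp [h1, h2]
        omega

-- ===== VERDICT (by name: the statement is the Claim_ definition above) =====
theorem summarize_batch_spec : Claim_equal_summarize_batch := by
  intro results _
  unfold Spec_summarize_batch summarize_batch summarize_batch_alt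
  rw [pvLoopA]
  unfold pvVd
  simp [PySem.List.count_eq]
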